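-- pv_equiv track=rewrite | github.com/Jonathyn-Winslow/Functions | Winslow_Functions.py | wall_swap
-- ===== SOURCE A (Python) =====
-- def wall_swap(maze, position):
--     """will swap all walls and empty spaces without effecting anything else"""
--     for y in range(len(maze)):
--         for x in range(len(maze[0])):
--             if (x, y) == position:
--                 continue
--             elif maze[y][x] == 1:
--                 maze[y][x] = 0
--             elif maze[y][x] == 0:
--                 maze[y][x] = 1
--
--     return maze
-- ===== SOURCE B (Python) =====
-- def wall_swap(maze, position):
--     """will swap all walls and empty spaces without effecting anything else"""
--     width = len(maze[0]) if maze else 0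
--     # phase 1: read-only scan collecting the coordinates of walls and of empty cells
--     walls = []
--     empties = []
--     for y, row in enumerate(maze):
--         for x in range(width):
--             if (x, y) != position:
--                 if row[x] == 1:
--                     walls.append((y, x))
--                 elif row[x] == 0:
--                     empties.append((y, x))
--     # phase 2: writes driven by the collected coordinate lists
--     for y, x in walls:
--         maze[y][x] = 0
--     for y, x in empties:
--         maze[y][x] = 1
--     return maze
-- ===== Notes on version B (the rewrite author's own statement) =====
-- stated objective: alternative
-- what changed: A toggles each cell in place inside one nested loop with a per-cell position test; B is two-phase: a read-only scan first collects the coordinates of wall cells and of empty cells into two lists, then two write passes driven by those coordinate lists set every collected wall to 0 and every collected empty cell to 1.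
-- outside the precondition, e.g. on wall_swap([[1, 0], [1]], (5, 5)): A raises IndexError, B raises IndexError; on wall_swap([[1, 0], [1]], (1, 1)): A returns [[0, 1], [0]], B returns [[0, 1], [0]]
import Mathlib
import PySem

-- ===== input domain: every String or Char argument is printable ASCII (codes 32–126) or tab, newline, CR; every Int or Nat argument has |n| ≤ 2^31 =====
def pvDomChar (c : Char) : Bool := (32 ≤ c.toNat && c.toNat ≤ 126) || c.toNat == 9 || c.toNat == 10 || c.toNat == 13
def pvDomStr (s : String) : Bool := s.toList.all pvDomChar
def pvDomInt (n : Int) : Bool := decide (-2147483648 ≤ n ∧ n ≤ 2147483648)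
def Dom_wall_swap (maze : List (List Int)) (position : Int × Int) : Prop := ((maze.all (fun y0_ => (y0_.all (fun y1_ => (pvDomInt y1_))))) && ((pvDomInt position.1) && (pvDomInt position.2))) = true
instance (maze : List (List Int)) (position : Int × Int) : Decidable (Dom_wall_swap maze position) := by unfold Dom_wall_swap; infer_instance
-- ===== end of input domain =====

-- B replaces A's in-place toggle-each-cell-except-position nested loop by a two-phase
-- algorithm: a read-only scan collects the coordinates of walls and of empty cells into two
-- lists, then two write passes driven by those lists set them to 0 resp. 1 (an alternative
-- decomposition, not faster). Both Pythons mutate `maze` in place the same way; the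
-- equivalence proved here is about the return value.

-- ===== PORT A =====
def wall_swap (maze : List (List Int)) (position : Int × Int) : List (List Int) :=
  (PySem.List.pyRange 0 (PySem.List.len maze) 1).foldl (fun m y =>
    (PySem.List.pyRange 0 (PySem.List.len (PySem.List.pyGetD m 0 [])) 1).foldl (fun m x =>
      if (x, y) = position then m
      else if PySem.List.pyGetD (PySem.List.pyGetD m y []) x 0 = 1 then
        PySem.List.pySetD m y (PySem.List.pySetD (PySem.List.pyGetD m y []) x 0)
      else if PySem.List.pyGetD (PySem.List.pyGetD m y []) x 0 = 0 then
        PySem.List.pySetD m y (PySem.List.pySetD (PySem.List.pyGetD m y []) x 1)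
      else m) m) maze

-- ===== PORT B =====
def wall_swap_alt (maze : List (List Int)) (position : Int × Int) : List (List Int) :=
  let width : Int := if maze ≠ [] then PySem.List.len (PySem.List.pyGetD maze 0 []) else 0
  -- phase 1: read-only scan collecting coordinates of walls and of empty cells
  let we : List (Int × Int) × List (Int × Int) :=
    (PySem.List.enumerate maze).foldl (fun acc yr =>
      (PySem.List.pyRange 0 width 1).foldl (fun acc x =>
        if (x, yr.1) ≠ position then
          if PySem.List.pyGetD yr.2 x 0 = 1 then (acc.1 ++ [(yr.1, x)], acc.2)
          else if PySem.List.pyGetD yr.2 x 0 = 0 then (acc.1, acc.2 ++ [(yr.1, x)])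
          else acc
        else acc) acc) ([], [])
  -- phase 2: writes driven by the collected coordinate lists
  let m1 := we.1.foldl (fun m p =>
    PySem.List.pySetD m p.1 (PySem.List.pySetD (PySem.List.pyGetD m p.1 []) p.2 0)) maze
  we.2.foldl (fun m p =>
    PySem.List.pySetD m p.1 (PySem.List.pySetD (PySem.List.pyGetD m p.1 []) p.2 1)) m1

-- ===== PRECONDITION & SPEC =====
-- Pre_ excludes ragged mazes in which some row is shorter than the first row: there A
-- raises IndexError (except for a degenerate corner where the `position` skip masks the
-- single missing index, on which A and B happen to agree anyway).
def Pre_wall_swap (maze : List (List Int)) (position : Int × Int) : Prop :=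
  ∀ r ∈ maze, (maze.getD 0 []).length ≤ r.length
instance (maze : List (List Int)) (position : Int × Int) : Decidable (Pre_wall_swap maze position) := by
  unfold Pre_wall_swap; infer_instance

def pvWitness_wall_swap : List (List Int) × (Int × Int) := ([[1, 0], [0, 1]], (0, 0))

def Spec_wall_swap (maze : List (List Int)) (position : Int × Int) (out : List (List Int)) : Prop := out = wall_swap_alt maze position
instance (maze : List (List Int)) (position : Int × Int) (out : List (List Int)) : Decidable (Spec_wall_swap maze position out) := by unfold Spec_wall_swap; infer_instance

-- ===== CLAIM (what is proved, stated in full; the proofs are below) =====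
def Claim_equal_wall_swap : Prop := ∀ (maze : List (List Int)) (position : Int × Int), Dom_wall_swap maze position → Pre_wall_swap maze position → Spec_wall_swap maze position (wall_swap maze position)

-- ===== LEMMAS AND PROOFS =====

def pyFlip (v : Int) : Int := if v = 1 then 0 else if v = 0 then 1 else v

-- the value A's loop leaves in cell (i, y) of a row whose original value there is v
def fcell (position : Int × Int) (y i : Nat) (v : Int) : Int :=
  if ((i : Int), (y : Int)) = position then v else pyFlip v

-- the row A's inner loop produces (only the first `cols` cells are visited)
def rowRes (position : Int × Int) (cols y : Nat) (r : List Int) : List Int :=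
  (r.mapIdx (fcell position y)).take cols ++ r.drop cols

def mazeRes (position : Int × Int) (cols : Nat) (maze : List (List Int)) : List (List Int) :=
  maze.mapIdx (fun y r => rowRes position cols y r)

-- one step of A's inner loop, at row level
def rowStep (position : Int × Int) (y : Nat) (s : List Int) (x : Nat) : List Int :=
  if ((x : Int), (y : Int)) = position then s
  else if s.getD x 0 = 1 then s.set x 0
  else if s.getD x 0 = 0 then s.set x 1
  else s

-- one step of A's inner loop, at maze level
def mazeStep (position : Int × Int) (y : Nat) (s : List (List Int)) (x : Nat) : List (List Int) :=
  if ((x : Int), (y : Int)) = position then s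
  else if (s.getD y []).getD x 0 = 1 then s.set y ((s.getD y []).set x 0)
  else if (s.getD y []).getD x 0 = 0 then s.set y ((s.getD y []).set x 1)
  else s

theorem pyRange_zero_cast (n : ℕ) :
    PySem.List.pyRange 0 (n : Int) 1 = List.map (fun k : ℕ => (k : Int)) (List.range n) := by
  rw [PySem.List.pyRange_one]
  simp

theorem step_read {α} (F orig : List α) (k : ℕ) (hk : k < orig.length) (hkF : k ≤ F.length) (d : α) :
    (F.take k ++ orig.drop k).getD k d = orig[k] := by
  rw [List.getD_eq_getElem?_getD, List.getElem?_append_right (by simp [hkF]),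
      List.length_take, min_eq_left hkF, Nat.sub_self,
      List.drop_eq_getElem_cons hk]
  simp [List.getElem?_eq_getElem hk]

theorem step_skip {α} (F orig : List α) (k : ℕ) (hk : k < orig.length) (hkF : k < F.length)
    (h : F[k] = orig[k]) :
    F.take k ++ orig.drop k = F.take (k + 1) ++ orig.drop (k + 1) := by
  rw [List.take_add_one, List.drop_eq_getElem_cons hk, List.getElem?_eq_getElem hkF]
  simp [h]

theorem step_shift {α} (F orig : List α) (k : ℕ) (hk : k < orig.length) (hkF : k < F.length) :
    (F.take k ++ orig.drop k).set k F[k] = F.take (k + 1) ++ orig.drop (k + 1) := by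
  have h1 : (List.take k F).length = k := by simp [le_of_lt hkF]
  rw [List.drop_eq_getElem_cons hk, List.set_append_right _ _ h1.le, h1,
      Nat.sub_self, List.set_cons_zero]
  have h2 : List.take (k+1) F = List.take k F ++ [F[k]] := by
    rw [List.take_add_one, List.getElem?_eq_getElem hkF]; rfl
  rw [h2, List.append_assoc, List.singleton_append]

theorem rowLoop (position : Int × Int) (y : ℕ) (r : List Int) (n : ℕ) (hn : n ≤ r.length) :
    (List.range n).foldl (rowStep position y) r
      = (r.mapIdx (fcell position y)).take n ++ r.drop n := by
  induction n with
  | zero => simp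
  | succ n ih =>
    have hn' : n < r.length := by omega
    have hG : (r.mapIdx (fcell position y)).length = r.length := by simp
    have hGn : (r.mapIdx (fcell position y))[n]'(by omega) = fcell position y n r[n] :=
      List.getElem_mapIdx
    rw [List.range_succ, List.foldl_append, ih (by omega)]
    simp only [List.foldl_cons, List.foldl_nil]
    rw [rowStep]
    rw [step_read _ _ _ hn' (by omega)]
    by_cases hpos : ((n : Int), (y : Int)) = position
    · rw [if_pos hpos]
      exact step_skip _ _ _ hn' (by omega) (by rw [hGn]; simp [fcell, hpos])
    · rw [if_neg hpos]
      by_cases h1 : r[n] = 1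
      · rw [if_pos h1]
        have : (0 : Int) = (r.mapIdx (fcell position y))[n]'(by omega) := by
          rw [hGn]; simp [fcell, hpos, pyFlip, h1]
        rw [this, step_shift _ _ _ hn' (by omega)]
      · rw [if_neg h1]
        by_cases h0 : r[n] = 0
        · rw [if_pos h0]
          have : (1 : Int) = (r.mapIdx (fcell position y))[n]'(by omega) := by
            rw [hGn]; simp [fcell, hpos, pyFlip, h0, h1]
          rw [this, step_shift _ _ _ hn' (by omega)]
        · rw [if_neg h0]
          exact step_skip _ _ _ hn' (by omega) (by rw [hGn]; simp [fcell, hpos, pyFlip, h1, h0])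

theorem liftStep (position : Int × Int) (y : ℕ) (m : List (List Int)) (hy : y < m.length)
    (r : List Int) (x : ℕ) :
    mazeStep position y (m.set y r) x = m.set y (rowStep position y r x) := by
  have hget : (m.set y r).getD y [] = r := by
    rw [List.getD_eq_getElem?_getD, List.getElem?_set_self (by simpa using hy)]
    simp
  rw [mazeStep, rowStep, hget]
  by_cases hpos : ((x : Int), (y : Int)) = position
  · simp [hpos]
  · simp only [if_neg hpos]
    split_ifs <;> simp [List.set_set]

theorem liftLoop (position : Int × Int) (y n : ℕ) (m : List (List Int)) (hy : y < m.length) :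
    (List.range n).foldl (mazeStep position y) m
      = m.set y ((List.range n).foldl (rowStep position y) (m.getD y [])) := by
  induction n with
  | zero =>
    simp only [List.range_zero, List.foldl_nil]
    rw [List.getD_eq_getElem?_getD, List.getElem?_eq_getElem hy]
    simp [List.set_getElem_self]
  | succ n ih =>
    rw [List.range_succ, List.foldl_append, ih]
    simp only [List.foldl_cons, List.foldl_nil]
    rw [List.foldl_append]
    simp only [List.foldl_cons, List.foldl_nil]
    exact liftStep position y m hy _ n

theorem length_rowRes (position : Int × Int) (cols y : ℕ) (r : List Int) (h : cols ≤ r.length) :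
    (rowRes position cols y r).length = r.length := by
  simp [rowRes]; omega

theorem outerLoop (maze : List (List Int)) (position : Int × Int)
    (hpre : Pre_wall_swap maze position) (k : ℕ) (hk : k ≤ maze.length) :
    (List.range k).foldl
        (fun m y => (List.range ((m.getD 0 []).length)).foldl (mazeStep position y) m) maze
      = (mazeRes position ((maze.getD 0 []).length) maze).take k ++ maze.drop k := by
  set cols := (maze.getD 0 []).length with hcols
  induction k with
  | zero => simp
  | succ k ih =>
    have hk' : k < maze.length := by omega
    have hF : (mazeRes position cols maze).length = maze.length := by simp [mazeRes]
    have hFk : (mazeRes position cols maze)[k]'(by omega) = rowRes position cols k (maze[k]'hk') := by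
      simp [mazeRes]
    have hck : cols ≤ (maze[k]'hk').length := hpre _ (List.getElem_mem hk')
    rw [List.range_succ, List.foldl_append, ih (by omega)]
    simp only [List.foldl_cons, List.foldl_nil]
    have hlen : ((((mazeRes position cols maze).take k ++ maze.drop k)).getD 0 []).length = cols := by
      cases k with
      | zero => simp [hcols]
      | succ j =>
        rw [List.getD_eq_getElem?_getD, List.getElem?_append_left (by simp; omega)]
        rw [List.getElem?_take_of_lt (by omega)]
        have h0 : 0 < maze.length := by omega
        rw [List.getElem?_eq_getElem (by omega : 0 < (mazeRes position cols maze).length)]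
        have : (mazeRes position cols maze)[0]'(by omega) = rowRes position cols 0 (maze[0]'h0) := by
          simp [mazeRes]
        rw [this]
        simp only [Option.getD_some]
        rw [length_rowRes _ _ _ _ (hpre _ (List.getElem_mem h0))]
        simp [hcols, List.getD_eq_getElem?_getD, List.getElem?_eq_getElem h0]
    rw [hlen]
    have hslen : ((mazeRes position cols maze).take k ++ maze.drop k).length = maze.length := by
      simp; omega
    rw [liftLoop position k cols _ (by omega : k < ((mazeRes position cols maze).take k ++ maze.drop k).length)]
    rw [step_read _ _ _ hk' (by omega)]
    rw [rowLoop position k _ cols hck]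
    have hstep := step_shift (mazeRes position cols maze) maze k hk' (by omega)
    rw [hFk] at hstep
    exact hstep

theorem A_eq (maze : List (List Int)) (position : Int × Int)
    (hpre : Pre_wall_swap maze position) :
    wall_swap maze position = mazeRes position ((maze.getD 0 []).length) maze := by
  have h1 : wall_swap maze position
      = (List.range maze.length).foldl
          (fun m y => (List.range ((m.getD 0 []).length)).foldl (mazeStep position y) m) maze := by
    unfold wall_swap
    rw [PySem.List.len_eq, pyRange_zero_cast, List.foldl_map]
    congr 1
    funext m yk
    rw [PySem.List.pyGetD_zero, PySem.List.len_eq, pyRange_zero_cast, List.foldl_map]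
    congr 1
    funext m' xk
    simp only [PySem.List.pyGetD_natCast, PySem.List.pySetD_natCast, mazeStep]
  rw [h1, outerLoop maze position hpre maze.length le_rfl]
  have hl : (mazeRes position ((maze.getD 0 []).length) maze).length = maze.length := by
    simp [mazeRes]
  rw [List.take_of_length_le (le_of_eq hl), List.drop_length, List.append_nil]

-- ===== B-side lemmas: characterize the collected coordinate lists and the write folds =====

-- the wall coordinates collected from one row
def Wrow (position : Int × Int) (cols : ℕ) (y : Int) (r : List Int) : List (Int × Int) :=
  ((List.range cols).filter
      (fun x => decide ((((x : ℕ) : Int), y) ≠ position ∧ r.getD x 0 = 1))).map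
    (fun x => (y, ((x : ℕ) : Int)))

-- the empty-cell coordinates collected from one row
def Erow (position : Int × Int) (cols : ℕ) (y : Int) (r : List Int) : List (Int × Int) :=
  ((List.range cols).filter
      (fun x => decide ((((x : ℕ) : Int), y) ≠ position ∧ r.getD x 0 ≠ 1 ∧ r.getD x 0 = 0))).map
    (fun x => (y, ((x : ℕ) : Int)))

def Walls (maze : List (List Int)) (position : Int × Int) (cols : ℕ) : List (Int × Int) :=
  (PySem.List.enumerate maze).flatMap (fun yr => Wrow position cols yr.1 yr.2)

def Empties (maze : List (List Int)) (position : Int × Int) (cols : ℕ) : List (Int × Int) :=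
  (PySem.List.enumerate maze).flatMap (fun yr => Erow position cols yr.1 yr.2)

-- one row's scan appends that row's wall / empty coordinates
theorem innerLoop (position : Int × Int) (y : Int) (r : List Int) (cols : ℕ)
    (acc : List (Int × Int) × List (Int × Int)) :
    (PySem.List.pyRange 0 ((cols : ℕ) : Int) 1).foldl (fun acc x =>
        if (x, y) ≠ position then
          if PySem.List.pyGetD r x 0 = 1 then (acc.1 ++ [(y, x)], acc.2)
          else if PySem.List.pyGetD r x 0 = 0 then (acc.1, acc.2 ++ [(y, x)])
          else acc
        else acc) acc
      = (acc.1 ++ Wrow position cols y r, acc.2 ++ Erow position cols y r) := by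
  rw [pyRange_zero_cast, List.foldl_map]
  induction cols with
  | zero => simp [Wrow, Erow]
  | succ n ih =>
    rw [List.range_succ, List.foldl_append, ih]
    simp only [List.foldl_cons, List.foldl_nil, PySem.List.pyGetD_natCast]
    unfold Wrow Erow
    rw [List.range_succ, List.filter_append, List.filter_append,
        List.map_append, List.map_append]
    by_cases hpos : (((n : ℕ) : Int), y) = position
    · simp [hpos, List.filter_cons]
    · by_cases h1 : r[n]?.getD 0 = 1
      · simp [hpos, h1, List.filter_cons, List.append_assoc, List.getD_eq_getElem?_getD]
      · by_cases h0 : r[n]?.getD 0 = 0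
        · simp [hpos, h1, h0, List.filter_cons, List.append_assoc, List.getD_eq_getElem?_getD]
        · simp [hpos, h1, h0, List.filter_cons, List.getD_eq_getElem?_getD]

-- a fold whose step appends to both components concatenates
theorem foldl_pair_append {α β : Type} (f : List β × List β → α → List β × List β)
    (g1 g2 : α → List β)
    (h : ∀ acc a, f acc a = (acc.1 ++ g1 a, acc.2 ++ g2 a)) :
    ∀ (L : List α) (acc : List β × List β),
      L.foldl f acc = (acc.1 ++ L.flatMap g1, acc.2 ++ L.flatMap g2) := by
  intro L
  induction L with
  | nil => intro acc; simp
  | cons a L ih =>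
    intro acc
    rw [List.foldl_cons, h, ih]
    simp [List.append_assoc]

theorem mem_Walls (maze : List (List Int)) (position : Int × Int) (cols : ℕ)
    (j i : ℕ) (hj : j < maze.length) :
    (((j : Int), (i : Int)) ∈ Walls maze position cols)
      ↔ i < cols ∧ (((i : Int), (j : Int)) ≠ position ∧ (maze[j]'hj).getD i 0 = 1) := by
  unfold Walls Wrow
  simp only [List.mem_flatMap, PySem.List.mem_enumerate_iff, List.mem_map, List.mem_filter,
    List.mem_range, decide_eq_true_eq, zero_add]
  constructor
  · rintro ⟨p, ⟨k, hk, rfl⟩, x, ⟨hx, hcond⟩, hpx⟩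
    have h1 := congrArg Prod.fst hpx
    have h2 := congrArg Prod.snd hpx
    simp only at h1 h2
    have hkj : k = j := by omega
    have hxi : x = i := by omega
    subst hkj; subst hxi
    exact ⟨hx, hcond⟩
  · rintro ⟨hx, hcond⟩
    exact ⟨((j : Int), maze[j]'hj), ⟨j, hj, rfl⟩, i, ⟨hx, hcond⟩, rfl⟩

theorem mem_Empties (maze : List (List Int)) (position : Int × Int) (cols : ℕ)
    (j i : ℕ) (hj : j < maze.length) :
    (((j : Int), (i : Int)) ∈ Empties maze position cols)
      ↔ i < cols ∧ (((i : Int), (j : Int)) ≠ position ∧ (maze[j]'hj).getD i 0 ≠ 1 ∧ (maze[j]'hj).getD i 0 = 0) := by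
  unfold Empties Erow
  simp only [List.mem_flatMap, PySem.List.mem_enumerate_iff, List.mem_map, List.mem_filter,
    List.mem_range, decide_eq_true_eq, zero_add]
  constructor
  · rintro ⟨p, ⟨k, hk, rfl⟩, x, ⟨hx, hcond⟩, hpx⟩
    have h1 := congrArg Prod.fst hpx
    have h2 := congrArg Prod.snd hpx
    simp only at h1 h2
    have hkj : k = j := by omega
    have hxi : x = i := by omega
    subst hkj; subst hxi
    exact ⟨hx, hcond⟩
  · rintro ⟨hx, hcond⟩
    exact ⟨((j : Int), maze[j]'hj), ⟨j, hj, rfl⟩, i, ⟨hx, hcond⟩, rfl⟩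

-- every coordinate of Walls / Empties is an in-bounds natural pair
theorem bounds_flatMap (maze : List (List Int)) (position : Int × Int) (cols : ℕ)
    (hpre : ∀ r ∈ maze, cols ≤ r.length)
    (G : Int × Int → ℕ → Int → List Int → List (Int × Int))
    (hG : ∀ y r, ∀ p ∈ G position cols y r, ∃ x : ℕ, x < cols ∧ p = (y, (x : Int))) :
    ∀ p ∈ (PySem.List.enumerate maze).flatMap (fun yr => G position cols yr.1 yr.2),
      ∃ (j i : ℕ), p = ((j : Int), (i : Int)) ∧ j < maze.length ∧ i < (maze.getD j []).length := by
  intro p hp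
  rw [List.mem_flatMap] at hp
  obtain ⟨yr, hyr, hpG⟩ := hp
  rw [PySem.List.mem_enumerate_iff] at hyr
  obtain ⟨k, hk, rfl⟩ := hyr
  obtain ⟨x, hx, rfl⟩ := hG _ _ _ hpG
  refine ⟨k, x, by simp, hk, ?_⟩
  have : maze.getD k [] = maze[k]'hk := by
    simp [List.getD_eq_getElem?_getD, List.getElem?_eq_getElem hk]
  rw [this]
  exact lt_of_lt_of_le hx (hpre _ (List.getElem_mem hk))

theorem getD_set_self_row (m : List (List Int)) (j : ℕ) (r : List Int) (hj : j < m.length) :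
    (m.set j r).getD j [] = r := by
  rw [List.getD_eq_getElem?_getD, List.getElem?_set_self (by simpa using hj)]
  simp

theorem getD_set_ne_row (m : List (List Int)) (j j0 : ℕ) (r : List Int) (h : j ≠ j0) :
    (m.set j0 r).getD j [] = m.getD j [] := by
  rw [List.getD_eq_getElem?_getD, List.getElem?_set_ne (by omega), ← List.getD_eq_getElem?_getD]

theorem getD_set_cell (r : List Int) (i i0 : ℕ) (c : Int) (hi0 : i0 < r.length) :
    (r.set i0 c).getD i 0 = if i = i0 then c else r.getD i 0 := by
  rw [List.getD_eq_getElem?_getD, List.getElem?_set]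
  by_cases hie : i = i0
  · simp [hie, hi0]
  · simp [hie, Ne.symm hie, List.getD_eq_getElem?_getD]

-- the write fold: set every listed coordinate to c, everything else untouched
theorem setCells (c : Int) (L : List (Int × Int)) :
    ∀ (m : List (List Int)),
      (∀ p ∈ L, ∃ (j i : ℕ), p = ((j : Int), (i : Int)) ∧ j < m.length ∧ i < (m.getD j []).length) →
      (L.foldl (fun m p =>
          PySem.List.pySetD m p.1 (PySem.List.pySetD (PySem.List.pyGetD m p.1 []) p.2 c)) m).length
          = m.length
      ∧ (∀ j : ℕ, ((L.foldl (fun m p =>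
          PySem.List.pySetD m p.1 (PySem.List.pySetD (PySem.List.pyGetD m p.1 []) p.2 c)) m).getD j []).length
          = (m.getD j []).length)
      ∧ (∀ j i : ℕ, j < m.length → i < (m.getD j []).length →
          ((L.foldl (fun m p =>
            PySem.List.pySetD m p.1 (PySem.List.pySetD (PySem.List.pyGetD m p.1 []) p.2 c)) m).getD j []).getD i 0
          = if ((j : Int), (i : Int)) ∈ L then c else (m.getD j []).getD i 0) := by
  induction L with
  | nil => intro m _; refine ⟨rfl, fun _ => rfl, fun j i _ _ => by simp⟩
  | cons p L ih =>
    intro m hL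
    obtain ⟨j0, i0, rfl, hj0, hi0⟩ := hL p List.mem_cons_self
    have hstep : PySem.List.pySetD m ((j0 : Int), (i0 : Int)).1
          (PySem.List.pySetD (PySem.List.pyGetD m ((j0 : Int), (i0 : Int)).1 []) ((j0 : Int), (i0 : Int)).2 c)
        = m.set j0 ((m.getD j0 []).set i0 c) := by
      simp [PySem.List.pySetD_natCast, PySem.List.pyGetD_natCast]
    set m1 := m.set j0 ((m.getD j0 []).set i0 c) with hm1
    have hlen1 : m1.length = m.length := by simp [hm1]
    have hrow1 : ∀ j : ℕ, (m1.getD j []).length = (m.getD j []).length := by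
      intro j
      by_cases hje : j = j0
      · subst hje
        rw [hm1, getD_set_self_row _ _ _ hj0]
        simp
      · rw [hm1, getD_set_ne_row _ _ _ _ hje]
    have hval1 : ∀ j i : ℕ, j < m.length → i < (m.getD j []).length →
        (m1.getD j []).getD i 0
          = if j = j0 ∧ i = i0 then c else (m.getD j []).getD i 0 := by
      intro j i hj hi
      by_cases hje : j = j0
      · subst hje
        rw [hm1, getD_set_self_row _ _ _ hj0, getD_set_cell _ _ _ _ hi0]
        by_cases hie : i = i0 <;> simp [hie]
      · rw [hm1, getD_set_ne_row _ _ _ _ hje]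
        simp [hje]
    have hL1 : ∀ p ∈ L, ∃ (j i : ℕ), p = ((j : Int), (i : Int)) ∧ j < m1.length ∧ i < (m1.getD j []).length := by
      intro p hp
      obtain ⟨j, i, rfl, hj, hi⟩ := hL p (List.mem_cons_of_mem _ hp)
      exact ⟨j, i, rfl, by omega, by rw [hrow1]; exact hi⟩
    obtain ⟨ihlen, ihrow, ihval⟩ := ih m1 hL1
    rw [List.foldl_cons, hstep]
    refine ⟨by rw [ihlen, hlen1], fun j => by rw [ihrow, hrow1], ?_⟩
    intro j i hj hi
    rw [ihval j i (by omega) (by rw [hrow1]; exact hi)]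
    rw [hval1 j i hj hi]
    by_cases hmem : ((j : Int), (i : Int)) ∈ L
    · simp [hmem]
    · simp only [if_neg hmem]
      by_cases heq : j = j0 ∧ i = i0
      · have : ((j : Int), (i : Int)) ∈ (((j0 : Int), (i0 : Int)) :: L) := by
          obtain ⟨h1, h2⟩ := heq; subst h1; subst h2; exact List.mem_cons_self
        simp [heq, this]
      · have : ((j : Int), (i : Int)) ∉ (((j0 : Int), (i0 : Int)) :: L) := by
          intro hc
          rcases List.mem_cons.mp hc with h | h
          · obtain ⟨h1, h2⟩ := Prod.mk.injEq .. ▸ h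
            exact heq ⟨by exact_mod_cast h1, by exact_mod_cast h2⟩
          · exact hmem h
        simp [heq, this]

theorem rowRes_get (position : Int × Int) (cols j : ℕ) (r : List Int) (hc : cols ≤ r.length)
    (i : ℕ) (hi : i < r.length) :
    (rowRes position cols j r).getD i 0
      = if i < cols then fcell position j i (r[i]'hi) else r[i]'hi := by
  unfold rowRes
  have htl : ((r.mapIdx (fcell position j)).take cols).length = cols := by simp; omega
  by_cases hic : i < cols
  · rw [List.getD_eq_getElem?_getD, List.getElem?_append_left (by omega)]
    rw [List.getElem?_take_of_lt hic, List.getElem?_eq_getElem (by simp; omega)]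
    simp [List.getElem_mapIdx, hic]
  · rw [List.getD_eq_getElem?_getD, List.getElem?_append_right (by omega), htl]
    have hdi : i - cols < (r.drop cols).length := by simp; omega
    rw [List.getElem?_eq_getElem hdi]
    have : (r.drop cols)[i - cols]'hdi = r[cols + (i - cols)]'(by omega) := List.getElem_drop ..
    have hidx : cols + (i - cols) = i := by omega
    simp only [Option.getD_some, this, if_neg hic]
    congr 1

theorem B_eq (maze : List (List Int)) (position : Int × Int)
    (hpre : Pre_wall_swap maze position) :
    wall_swap_alt maze position = mazeRes position ((maze.getD 0 []).length) maze := by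
  set cols := (maze.getD 0 []).length with hcols
  have hw : (if maze ≠ [] then PySem.List.len (PySem.List.pyGetD maze 0 []) else 0)
      = ((cols : ℕ) : Int) := by
    by_cases h : maze = []
    · subst h; simp [hcols]
    · simp [h, PySem.List.pyGetD_zero, hcols]
  have hcoll : (PySem.List.enumerate maze).foldl (fun acc yr =>
      (PySem.List.pyRange 0 ((cols : ℕ) : Int) 1).foldl (fun acc x =>
        if (x, yr.1) ≠ position then
          if PySem.List.pyGetD yr.2 x 0 = 1 then (acc.1 ++ [(yr.1, x)], acc.2)
          else if PySem.List.pyGetD yr.2 x 0 = 0 then (acc.1, acc.2 ++ [(yr.1, x)])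
          else acc
        else acc) acc) (([], []) : List (Int × Int) × List (Int × Int))
      = (Walls maze position cols, Empties maze position cols) := by
    rw [foldl_pair_append _ (fun yr => Wrow position cols yr.1 yr.2)
        (fun yr => Erow position cols yr.1 yr.2)
        (fun acc yr => innerLoop position yr.1 yr.2 cols acc)]
    simp [Walls, Empties]
  have hpre' : ∀ r ∈ maze, cols ≤ r.length := hpre
  have hWb : ∀ p ∈ Walls maze position cols,
      ∃ (j i : ℕ), p = ((j : Int), (i : Int)) ∧ j < maze.length ∧ i < (maze.getD j []).length := by
    apply bounds_flatMap maze position cols hpre' (fun pos c y r => Wrow pos c y r)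
    intro y r p hp
    unfold Wrow at hp
    simp only [List.mem_map, List.mem_filter, List.mem_range] at hp
    obtain ⟨x, ⟨hx, _⟩, rfl⟩ := hp
    exact ⟨x, hx, rfl⟩
  obtain ⟨hWlen, hWrow, hWval⟩ := setCells 0 (Walls maze position cols) maze hWb
  set m1 := (Walls maze position cols).foldl (fun m p =>
      PySem.List.pySetD m p.1 (PySem.List.pySetD (PySem.List.pyGetD m p.1 []) p.2 0)) maze with hm1def
  have hEb : ∀ p ∈ Empties maze position cols,
      ∃ (j i : ℕ), p = ((j : Int), (i : Int)) ∧ j < m1.length ∧ i < (m1.getD j []).length := by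
    have h0 : ∀ p ∈ Empties maze position cols,
        ∃ (j i : ℕ), p = ((j : Int), (i : Int)) ∧ j < maze.length ∧ i < (maze.getD j []).length := by
      apply bounds_flatMap maze position cols hpre' (fun pos c y r => Erow pos c y r)
      intro y r p hp
      unfold Erow at hp
      simp only [List.mem_map, List.mem_filter, List.mem_range] at hp
      obtain ⟨x, ⟨hx, _⟩, rfl⟩ := hp
      exact ⟨x, hx, rfl⟩
    intro p hp
    obtain ⟨j, i, rfl, hj, hi⟩ := h0 p hp
    exact ⟨j, i, rfl, by rw [hWlen]; exact hj, by rw [hWrow]; exact hi⟩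
  obtain ⟨hElen, hErow, hEval⟩ := setCells 1 (Empties maze position cols) m1 hEb
  set m2 := (Empties maze position cols).foldl (fun m p =>
      PySem.List.pySetD m p.1 (PySem.List.pySetD (PySem.List.pyGetD m p.1 []) p.2 1)) m1 with hm2def
  have hres : wall_swap_alt maze position = m2 := by
    unfold wall_swap_alt
    rw [hw]
    simp only [hcoll]
    rw [hm2def, hm1def]
  rw [hres]
  have hm2len : m2.length = maze.length := by rw [hElen, hWlen]
  have hm2row : ∀ j : ℕ, (m2.getD j []).length = (maze.getD j []).length := by
    intro j; rw [hErow, hWrow]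
  apply List.ext_getElem
  · rw [hm2len]; simp [mazeRes]
  · intro j hj1 hj2
    have hjm : j < maze.length := by omega
    have hgetD2 : m2.getD j [] = m2[j]'hj1 := by
      simp [List.getD_eq_getElem?_getD, List.getElem?_eq_getElem hj1]
    have hgetDm : maze.getD j [] = maze[j]'hjm := by
      simp [List.getD_eq_getElem?_getD, List.getElem?_eq_getElem hjm]
    have hmr : (mazeRes position cols maze)[j]'hj2 = rowRes position cols j (maze[j]'hjm) := by
      simp [mazeRes]
    rw [hmr]
    have hcj : cols ≤ (maze[j]'hjm).length := hpre' _ (List.getElem_mem hjm)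
    apply List.ext_getElem
    · rw [← hgetD2, hm2row, hgetDm, length_rowRes _ _ _ _ hcj]
    · intro i hi1 hi2
      have hir : i < (maze[j]'hjm).length := by
        rw [← hgetD2] at hi1; rw [hm2row, hgetDm] at hi1; exact hi1
      have hgi2 : (m2[j]'hj1)[i]'hi1 = (m2.getD j []).getD i 0 := by
        rw [hgetD2, List.getD_eq_getElem?_getD, List.getElem?_eq_getElem hi1]
        simp
      have hgir : (rowRes position cols j (maze[j]'hjm))[i]'hi2
          = (rowRes position cols j (maze[j]'hjm)).getD i 0 := by
        rw [List.getD_eq_getElem?_getD, List.getElem?_eq_getElem hi2]; simp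
      rw [hgi2, hgir, rowRes_get position cols j _ hcj i hir]
      rw [hEval j i (by omega) (by rw [hWrow, hgetDm]; exact hir)]
      rw [hWval j i hjm (by rw [hgetDm]; exact hir)]
      simp only [mem_Empties maze position cols j i hjm, mem_Walls maze position cols j i hjm]
      have hgd : (maze[j]'hjm).getD i 0 = (maze[j]'hjm)[i]'hir := by
        simp [List.getD_eq_getElem?_getD, List.getElem?_eq_getElem hir]
      rw [hgetDm, hgd]
      set v := (maze[j]'hjm)[i]'hir with hv
      by_cases hic : i < cols
      · by_cases hpos : ((i : Int), (j : Int)) = position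
        · simp [hic, hpos, fcell]
        · by_cases h1 : v = 1
          · simp [hic, hpos, h1, fcell, pyFlip]
          · by_cases h0 : v = 0
            · simp [hic, hpos, h0, h1, fcell, pyFlip]
            · simp [hic, hpos, h0, h1, fcell, pyFlip]
      · simp [hic]

-- ===== VERDICT (by name: the statement is the Claim_ definition above) =====
theorem wall_swap_spec : Claim_equal_wall_swap := by
  intro maze position _ hpre
  unfold Spec_wall_swap
  rw [A_eq maze position hpre, B_eq maze position hpre]
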